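-- pv_equiv track=rewrite | github.com/saifcore7/Calculator | CALCULATOR/simple_calculator.py | is_valid_expression
-- ===== SOURCE A (Python) =====
-- def is_valid_expression(expression):
--     """
--     Check if the expression is valid
--     """
--     valid_operators = ("+", "-", "*", "/")
--     valid_chars = valid_operators + \
--         (" ",) + tuple(map(str, range(10)))  # Valid characters
--
--     for char in expression:
--         if char not in valid_chars:
--             return False
--
--     if expression.count("+") + expression.count("-") + expression.count("*") + expression.count("/") != 1:
--         return False  # Invalid number of operators
--
--     return True
-- ===== SOURCE B (Python) =====
-- def is_valid_expression(expression):
--     """One pass: validate each char and tally operators as we go."""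
--     operators = {"+", "-", "*", "/"}
--     count = 0
--     for char in expression:
--         if char in operators:
--             count += 1
--         elif not (char == " " or char.isdigit()):
--             return False
--     return count == 1
-- ===== Notes on version B (the rewrite author's own statement) =====
-- stated objective: alternative
-- what changed: B validates and tallies operators in a single accumulating pass instead of A's validation loop followed by four separate .count() scans.
import Mathlib
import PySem

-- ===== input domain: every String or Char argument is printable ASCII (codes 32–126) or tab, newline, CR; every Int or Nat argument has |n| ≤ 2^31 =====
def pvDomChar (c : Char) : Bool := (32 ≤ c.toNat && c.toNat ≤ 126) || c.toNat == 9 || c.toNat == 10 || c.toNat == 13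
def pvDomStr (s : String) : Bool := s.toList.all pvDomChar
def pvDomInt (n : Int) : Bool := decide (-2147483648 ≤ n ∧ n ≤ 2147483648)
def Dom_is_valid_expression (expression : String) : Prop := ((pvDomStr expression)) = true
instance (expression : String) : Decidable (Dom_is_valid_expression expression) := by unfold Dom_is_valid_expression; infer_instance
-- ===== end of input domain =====

-- B validates and tallies operators in a single accumulating pass instead of A's
-- validation loop followed by four separate .count() scans (alternative decomposition).

-- ===== PORT A =====
-- valid_chars = ("+","-","*","/") + (" ",) + tuple(map(str, range(10)))
def pvValidCharsA : List Char :=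
  ['+', '-', '*', '/', ' ', '0', '1', '2', '3', '4', '5', '6', '7', '8', '9']

-- the for-loop: return False at the first char not in valid_chars
def pvLoopA : List Char → Bool
  | [] => true
  | c :: cs => if c ∈ pvValidCharsA then pvLoopA cs else false

def is_valid_expression (expression : String) : Bool :=
  let l := expression.toList
  if pvLoopA l then
    -- expression.count("+") + … + expression.count("/") != 1 → return False
    if (l.count '+' + l.count '-' + l.count '*' + l.count '/' : Int) ≠ 1 then false
    else true
  else false

-- ===== PORT B =====
-- single pass: tally operators, reject any char that is not operator/space/digit
def pvLoopB : List Char → Int → Bool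
  | [], count => decide (count = 1)
  | c :: cs, count =>
    if c ∈ ['+', '-', '*', '/'] then pvLoopB cs (count + 1)
    else if c == ' ' || PySem.Chars.isdigit c then pvLoopB cs count
    else false

def is_valid_expression_alt (expression : String) : Bool :=
  pvLoopB expression.toList 0

-- ===== PRECONDITION & SPEC =====
def Spec_is_valid_expression (expression : String) (out : Bool) : Prop := out = is_valid_expression_alt expression
instance (expression : String) (out : Bool) : Decidable (Spec_is_valid_expression expression out) := by unfold Spec_is_valid_expression; infer_instance

-- ===== CLAIM (what is proved, stated in full; the proofs are below) =====
def Claim_equal_is_valid_expression : Prop := ∀ (expression : String), Dom_is_valid_expression expression → Spec_is_valid_expression expression (is_valid_expression expression)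

-- ===== LEMMAS AND PROOFS =====

def pvOpCount (l : List Char) : Int :=
  (l.count '+' + l.count '-' + l.count '*' + l.count '/' : Int)

theorem pv_digit_mem (c : Char) (h1 : '0' ≤ c) (h2 : c ≤ '9') :
    c ∈ ['0', '1', '2', '3', '4', '5', '6', '7', '8', '9'] := by
  have hn1 : 48 ≤ c.toNat := h1
  have hn2 : c.toNat ≤ 57 := h2
  have hofn := Char.ofNat_toNat c
  interval_cases h : c.toNat <;> simp_all <;> (rw [← hofn]; decide)

theorem pvLoopB_invariant (l : List Char) (n : Int) :
    pvLoopB l n = (pvLoopA l && decide (n + pvOpCount l = 1)) := by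
  induction l generalizing n with
  | nil => simp [pvLoopB, pvLoopA, pvOpCount]
  | cons c cs ih =>
    by_cases hop : c ∈ ['+', '-', '*', '/']
    · have hv : c ∈ pvValidCharsA := by
        fin_cases hop <;> simp [pvValidCharsA]
      have hcnt : pvOpCount (c :: cs) = pvOpCount cs + 1 := by
        fin_cases hop <;> (simp [pvOpCount]; ring)
      simp only [pvLoopB, if_pos hop, pvLoopA, if_pos hv, ih, hcnt]
      congr 1
      simp only [decide_eq_decide]
      omega
    · have hcnt : pvOpCount (c :: cs) = pvOpCount cs := by
        simp only [List.mem_cons, List.not_mem_nil, or_false] at hop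
        push Not at hop
        simp [pvOpCount, hop.1, hop.2.1, hop.2.2]
      by_cases hsp : (c == ' ' || PySem.Chars.isdigit c) = true
      · have hv : c ∈ pvValidCharsA := by
          rcases Bool.or_eq_true_iff.mp hsp with h | h
          · simp [pvValidCharsA, beq_iff_eq.mp h]
          · unfold PySem.Chars.isdigit at h
            have h1 : '0' ≤ c := by simpa using (Bool.and_eq_true_iff.mp h).1
            have h2 : c ≤ '9' := by simpa using (Bool.and_eq_true_iff.mp h).2
            have := pv_digit_mem c h1 h2
            fin_cases this <;> simp [pvValidCharsA]
        simp only [pvLoopB, if_neg hop, if_pos hsp, pvLoopA, if_pos hv, ih, hcnt]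
      · have hv : c ∉ pvValidCharsA := by
          intro hmem
          fin_cases hmem <;> simp_all [PySem.Chars.isdigit]
        simp only [pvLoopB, if_neg hop, if_neg hsp, pvLoopA, if_neg hv, Bool.false_and]

theorem pv_main_eq (l : List Char) :
    pvLoopB l 0 = (if pvLoopA l then (if pvOpCount l ≠ 1 then false else true) else false) := by
  rw [pvLoopB_invariant]
  by_cases h : pvLoopA l = true <;> by_cases h2 : pvOpCount l = 1 <;> simp [h, h2]

-- ===== VERDICT (by name: the statement is the Claim_ definition above) =====
theorem is_valid_expression_spec : Claim_equal_is_valid_expression := by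
  intro e _
  unfold Spec_is_valid_expression is_valid_expression_alt
  rw [pv_main_eq e.toList]
  rfl
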